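-- pv_equiv track=rewrite | github.com/alecjackson27/OvertPrivilege | HW1/utils.py | untransposeTextByColumn
-- ===== SOURCE A (Python) =====
-- def untransposeTextByColumn(key, cipher):
--     col = len(key)
--
--     #find out how many letters from the cipher will be with each column from the key (they are each different because there is no padding))
--     letters_per_char = len(cipher) // len(key) #each column will have at least <letters_per_char> letters
--     leftovers = len(cipher) % len(key) #the first <leftovers> columns will have 1 extra letter
--
--     key_list = list(key)
--
--     #join the number of letters each column will have with the associated letters from the key
--     numbers_list = []
--     for i in range(col):
--         numbers_list.append(letters_per_char)
--     for i in range(leftovers):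
--         numbers_list[i] += 1;
--
--     #sort the columns back to alphabetical order to determine the block sizes from the cipher (again, different because there is no padding)
--     key_numbers = list(zip(key_list,numbers_list))
--     key_numbers.sort(key = lambda x: x[0])
--
--     #remove the correct amount of letters from the cipher and arrange them into the correct amounts per column
--     start_i = 0
--     end_i = 0
--     cipher_divide = []
--     for i in key_numbers:
--         end_i += int(i[1])
--         cipher_divide.append(cipher[start_i:end_i])
--         start_i += int(i[1])
--
--     #take the new columns of letters from the cipher and put them in their associated columns with the key
--     key_ordered = sorted(key)
--     arranged_cipher = list(zip(key_ordered,cipher_divide))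
--
--     #put the columns back in the order to put the key letters back in place with the associated columns moving as well
--     ordered_arranged_cipher = []
--     for i in key:
--         for j in arranged_cipher:
--             if i == j[0]:
--                 ordered_arranged_cipher.append(j)
--                 arranged_cipher.remove(j)
--                 break
--
--     #take the letters from each column and put them back in the original message
--     message = ''
--     for i in range(letters_per_char+1):
--         for j in ordered_arranged_cipher:
--             if i < len(j[1]):
--                 message += j[1][i]
--
--
--     return message
-- ===== SOURCE B (Python) =====
-- def untransposeTextByColumn(key, cipher):
--     n = len(key)
--     q = len(cipher) // n
--     r = len(cipher) % n
--     # stable sort of the column indices by their key letter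
--     order = [i for i, _ in sorted(enumerate(key), key=lambda t: t[1])]
--     # cut the cipher into blocks (first r columns get one extra letter) and
--     # drop each block straight into its original column slot
--     cols = [''] * n
--     pos = 0
--     for i in order:
--         size = q + 1 if i < r else q
--         cols[i] = cipher[pos:pos + size]
--         pos += size
--     # read the plaintext row by row
--     out = []
--     for j in range(q + 1):
--         for c in cols:
--             if j < len(c):
--                 out.append(c[j])
--     return ''.join(out)
-- ===== Notes on version B (the rewrite author's own statement) =====
-- stated objective: faster
-- what changed: A's quadratic pick-and-remove loop that re-scans the arranged block list for each key letter is replaced by one stable sort of the column indices by key letter and direct assignment of each cipher block into its original column slot.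
import Mathlib
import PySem

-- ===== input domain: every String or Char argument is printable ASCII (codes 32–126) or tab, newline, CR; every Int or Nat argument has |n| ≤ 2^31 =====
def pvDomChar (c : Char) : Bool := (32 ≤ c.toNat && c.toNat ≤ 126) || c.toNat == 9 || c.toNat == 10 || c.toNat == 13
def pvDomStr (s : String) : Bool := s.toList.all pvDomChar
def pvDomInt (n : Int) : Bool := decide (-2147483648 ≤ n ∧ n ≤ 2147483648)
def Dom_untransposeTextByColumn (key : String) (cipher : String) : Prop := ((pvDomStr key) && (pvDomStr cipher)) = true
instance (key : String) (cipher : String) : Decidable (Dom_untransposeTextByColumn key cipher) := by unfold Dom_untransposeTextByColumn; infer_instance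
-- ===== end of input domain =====

-- B replaces A's quadratic pick-and-remove matching of cipher blocks to key letters by a single
-- stable index sort and direct slot assignment (objective: faster on long keys).


-- ===== PORT A =====

-- 'for i in range(col): numbers_list.append(letters_per_char)' then
-- 'for i in range(leftovers): numbers_list[i] += 1' (item assignment at i ∈ range(leftovers),
-- always in range since leftovers ≤ col; ported by hand as List.set / List.getD, exact there)
def pvA_buildNums (col lo q : Int) : List Int :=
  let nums0 := (PySem.List.pyRange 0 col 1).foldl (fun acc _ => acc ++ [q]) []
  (PySem.List.pyRange 0 lo 1).foldl (fun acc i => acc.set i.toNat (acc.getD i.toNat 0 + 1)) nums0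

-- the slicing loop: state (cipher_divide, start_i, end_i)
def pvA_slices (cs : List Char) (kn : List (Char × Int)) : List (List Char) :=
  (kn.foldl (fun st i =>
      let e := st.2.2 + i.2
      (st.1 ++ [PySem.Chars.slice cs (some st.2.1) (some e)], (st.2.1 + i.2, e)))
    (([], 0, 0) : List (List Char) × Int × Int)).1

-- 'for j in arranged_cipher: if i == j[0]: append(j); arranged_cipher.remove(j); break'
-- the scan stops at the FIRST pair whose letter equals i, and .remove(j) deletes the first
-- element equal to j, which is that very pair (an earlier equal pair would also have letter i):
-- ported as one scan returning the found pair and the list without it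
def pvA_scanPick (c : Char) : List (Char × List Char) → Option (Char × List Char) × List (Char × List Char)
  | [] => (none, [])
  | j :: rest =>
      if c = j.1 then (some j, rest)
      else
        let (f, r) := pvA_scanPick c rest
        (f, j :: r)

def pvA_match (ks : List Char) (arr : List (Char × List Char)) : List (Char × List Char) :=
  (ks.foldl (fun st i =>
      match pvA_scanPick i st.2 with
      | (some j, rest) => (st.1 ++ [j], rest)
      | (none, rest) => (st.1, rest))
    (([], arr) : List (Char × List Char) × List (Char × List Char))).1

-- 'for i in range(letters_per_char+1): for j in ordered_arranged_cipher: if i < len(j[1]): message += j[1][i]'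
-- (j[1][i] with 0 ≤ i < len(j[1]): in range, List.pyGetD is exact there)
def pvA_read (lpc : Int) (ordered : List (Char × List Char)) : List Char :=
  (PySem.List.pyRange 0 (lpc + 1) 1).foldl (fun m i =>
    ordered.foldl (fun m j =>
      if i < PySem.List.len j.2 then m ++ [PySem.List.pyGetD j.2 i ' '] else m) m) []

def untransposeTextByColumn (key : String) (cipher : String) : String :=
  let ks := key.toList
  let cs := cipher.toList
  let col := PySem.List.len ks
  let lpc := PySem.Int.floordiv (PySem.List.len cs) (PySem.List.len ks)
  let lo := PySem.Int.mod (PySem.List.len cs) (PySem.List.len ks)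
  let nums := pvA_buildNums col lo lpc
  let keyNumbers := PySem.List.sorted (ks.zip nums) (fun x => x.1)
  let divide := pvA_slices cs keyNumbers
  let keyOrdered := PySem.List.sorted ks (fun c => c)
  let arranged := keyOrdered.zip divide
  let ordered := pvA_match ks arranged
  String.ofList (pvA_read lpc ordered)

-- ===== PORT B =====

-- 'for i in order: cols[i] = cipher[pos:pos+size]; pos += size'
-- (item assignment at i ∈ range(n), in range; ported as List.set, exact there)
def pvB_fill (cs : List Char) (q r : Int) (n : Nat) (order : List Int) : List (List Char) :=
  (order.foldl (fun st i =>
      let size := if i < r then q + 1 else q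
      (st.1.set i.toNat (PySem.Chars.slice cs (some st.2) (some (st.2 + size))), st.2 + size))
    ((List.replicate n ([] : List Char), (0 : Int)))).1

-- 'for j in range(q+1): for c in cols: if j < len(c): out.append(c[j])'
def pvB_read (q : Int) (cols : List (List Char)) : List Char :=
  (PySem.List.pyRange 0 (q + 1) 1).foldl (fun acc j =>
    cols.foldl (fun acc c =>
      if j < PySem.List.len c then acc ++ [PySem.List.pyGetD c j ' '] else acc) acc) []

def untransposeTextByColumn_alt (key : String) (cipher : String) : String :=
  let ks := key.toList
  let cs := cipher.toList
  let n := PySem.List.len ks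
  let q := PySem.Int.floordiv (PySem.List.len cs) n
  let r := PySem.Int.mod (PySem.List.len cs) n
  let order := (PySem.List.sorted (PySem.List.enumerate ks) (fun t => t.2)).map (fun t => t.1)
  let cols := pvB_fill cs q r ks.length order
  String.ofList (pvB_read q cols)

-- ===== PRECONDITION & SPEC =====
-- Pre_ excludes only the empty key, on which A raises ZeroDivisionError (len(cipher) // len(key))
def Pre_untransposeTextByColumn (key : String) (cipher : String) : Prop := key ≠ ""
instance (key : String) (cipher : String) : Decidable (Pre_untransposeTextByColumn key cipher) := by unfold Pre_untransposeTextByColumn; infer_instance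
def pvWitness_untransposeTextByColumn : String × String := ("bca", "XYZW")

def Spec_untransposeTextByColumn (key : String) (cipher : String) (out : String) : Prop := out = untransposeTextByColumn_alt key cipher
instance (key : String) (cipher : String) (out : String) : Decidable (Spec_untransposeTextByColumn key cipher out) := by unfold Spec_untransposeTextByColumn; infer_instance

-- ===== CLAIM (what is proved, stated in full; the proofs are below) =====
def Claim_equal_untransposeTextByColumn : Prop := ∀ (key : String) (cipher : String), Dom_untransposeTextByColumn key cipher → Pre_untransposeTextByColumn key cipher → Spec_untransposeTextByColumn key cipher (untransposeTextByColumn key cipher)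

-- ===== LEMMAS AND PROOFS =====

-- the stable-sort order on (index, letter) pairs: letter first, original index breaks ties
def pvLL (a b : Int × Char) : Prop := a.2 < b.2 ∨ (a.2 = b.2 ∧ a.1 < b.1)

-- the blocks the cipher is cut into, following the index list 'is' with running position
def pvBlocks (cs : List Char) (f : Int → Int) : List Int → Int → List (List Char)
  | [], _ => []
  | i :: t, pos => PySem.Chars.slice cs (some pos) (some (pos + f i)) :: pvBlocks cs f t (pos + f i)

-- the block attached to original column index i
def pvPickD (Z : List ((Int × Char) × List Char)) (i : Int) : List Char :=
  ((Z.find? (fun w => w.1.1 == i)).map (fun w => w.2)).getD []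

theorem pv_pyRange_pairwise_lt (a b : Int) :
    (PySem.List.pyRange a b 1).Pairwise (fun x y => x < y) := by
  rw [PySem.List.pyRange_one]
  rw [List.pairwise_map]
  exact List.pairwise_lt_range.imp (by intro x y h; omega)

theorem pv_pyRange_nodup (a b : Int) : (PySem.List.pyRange a b 1).Nodup := by
  exact (pv_pyRange_pairwise_lt a b).imp (by intro x y h; exact ne_of_lt h)

theorem pv_pyRange_getElem (nI : Int) (k : Nat) (h : k < (PySem.List.pyRange 0 nI 1).length) :
    (PySem.List.pyRange 0 nI 1)[k] = (k : Int) := by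
  have hk : k < nI.toNat := by rw [PySem.List.pyRange_zero] at h; simpa using h
  have h2 : (PySem.List.pyRange 0 nI 1)[k]? = some (k : Int) := by
    rw [PySem.List.pyRange_zero]
    simp [hk]
  rw [List.getElem?_eq_getElem h] at h2
  exact Option.some.inj h2

theorem pv_enumerate_pairwise (ks : List Char) (s : Int) :
    (PySem.List.enumerate ks s).Pairwise (fun a b => a.1 < b.1) := by
  have h := pv_pyRange_pairwise_lt s (s + (ks.length : Int))
  rw [← PySem.List.map_fst_enumerate ks s, List.pairwise_map] at h
  exact h

theorem pv_fst_mem_enumerate (ks : List Char) (s : Int) (p : Int × Char)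
    (hp : p ∈ PySem.List.enumerate ks s) : s ≤ p.1 ∧ p.1 < s + (ks.length : Int) := by
  have h : p.1 ∈ (PySem.List.enumerate ks s).map (fun x => x.1) := List.mem_map_of_mem hp
  rw [PySem.List.map_fst_enumerate] at h
  exact PySem.List.mem_pyRange_one.mp h

theorem pv_incr (q nI : Int) (r : Nat) (hr : (r : Int) ≤ nI) :
    (PySem.List.pyRange 0 (r : Int) 1).foldl
        (fun acc i => acc.set i.toNat (acc.getD i.toNat 0 + 1))
        ((PySem.List.pyRange 0 nI 1).map (fun _ => q))
      = (PySem.List.pyRange 0 nI 1).map (fun i => if i < (r : Int) then q + 1 else q) := by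
  induction r with
  | zero =>
      simp only [Nat.cast_zero]
      rw [show PySem.List.pyRange 0 0 1 = [] from rfl]
      simp only [List.foldl_nil]
      apply List.map_congr_left
      intro i hi
      have := PySem.List.mem_pyRange_one.mp hi
      rw [if_neg (by omega)]
  | succ m ih =>
      have h1 : ((m + 1 : Nat) : Int) = (m : Int) + 1 := by push_cast; ring
      rw [h1, PySem.List.pyRange_one_succ_right (by positivity), List.foldl_append, ih (by omega)]
      simp only [List.foldl_cons, List.foldl_nil]
      have hlen : (PySem.List.pyRange 0 nI 1).length = nI.toNat := by
        rw [PySem.List.pyRange_one]; simp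
      have hmlt : m < nI.toNat := by omega
      have hmN : ((m : Int)).toNat = m := by omega
      have hmlen : m < ((PySem.List.pyRange 0 nI 1).map
          (fun i => if i < (m : Int) then q + 1 else q)).length := by
        simpa [hlen] using hmlt
      have hgetD : ((PySem.List.pyRange 0 nI 1).map
          (fun i => if i < (m : Int) then q + 1 else q)).getD ((m : Int)).toNat 0 = q := by
        rw [hmN, List.getD_eq_getElem _ _ hmlen, List.getElem_map,
          pv_pyRange_getElem nI m (by simpa [hlen] using hmlt)]
        rw [if_neg (lt_irrefl _)]
      rw [hgetD, hmN]
      apply List.ext_getElem?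
      intro j
      rw [List.getElem?_set]
      by_cases hjm : m = j
      · subst hjm
        rw [if_pos rfl, if_pos hmlen]
        rw [List.getElem?_eq_getElem (by simpa [hlen] using hmlt)]
        rw [List.getElem_map, pv_pyRange_getElem nI m (by simpa [hlen] using hmlt)]
        rw [if_pos (by omega)]
      · rw [if_neg hjm]
        rw [List.getElem?_map, List.getElem?_map]
        by_cases hj : j < nI.toNat
        · rw [List.getElem?_eq_getElem (by simpa [hlen] using hj)]
          simp only [Option.map_some]
          rw [pv_pyRange_getElem nI j (by simpa [hlen] using hj)]
          have : ((j : Int) < (m : Int)) ↔ ((j : Int) < (m : Int) + 1) := by omega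
          by_cases hlt : (j : Int) < (m : Int)
          · rw [if_pos hlt, if_pos (by omega)]
          · rw [if_neg hlt, if_neg (by omega)]
        · rw [List.getElem?_eq_none (by simpa [hlen] using Nat.le_of_not_lt hj)]
          simp

theorem pv_buildNums_eq (nI : Int) (q : Int) (r : Nat) (hr : (r : Int) ≤ nI) :
    pvA_buildNums nI ((r : Nat) : Int) q
      = (PySem.List.pyRange 0 nI 1).map (fun i => if i < (r : Int) then q + 1 else q) := by
  unfold pvA_buildNums
  rw [PySem.List.foldl_append_singleton_eq_map (fun _ => q)]
  simpa using pv_incr q nI r hr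

theorem pv_zip_eq (ks : List Char) (f : Int → Int) :
    ks.zip ((PySem.List.pyRange 0 (PySem.List.len ks) 1).map f)
      = (PySem.List.enumerate ks).map (fun p => (p.2, f p.1)) := by
  apply List.ext_getElem
  · simp [PySem.List.length_enumerate, PySem.List.len]
  intro j hj1 hj2
  simp only [List.length_zip, List.length_map] at hj1
  have hjk : j < ks.length := by omega
  rw [List.getElem_zip, List.getElem_map, List.getElem_map,
    PySem.List.getElem_enumerate]
  rw [pv_pyRange_getElem]
  simp

theorem pv_insertBy_map {α β κ : Type} [LT κ] [DecidableLT κ] (g : α → β) (key : β → κ)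
    (x : α) (ys : List α) :
    PySem.List.insertBy (fun a b => decide (key a < key b)) (g x) (ys.map g)
      = (PySem.List.insertBy (fun a b => decide (key (g a) < key (g b))) x ys).map g := by
  induction ys with
  | nil => rfl
  | cons y t ih =>
      by_cases h : key (g x) < key (g y)
      · simp [PySem.List.insertBy, h]
      · simp [PySem.List.insertBy, h, ih]

theorem pv_sorted_map {α β κ : Type} [LT κ] [DecidableLT κ] (g : α → β) (key : β → κ)
    (xs : List α) :
    PySem.List.sorted (xs.map g) key
      = (PySem.List.sorted xs (fun a => key (g a))).map g := by
  rw [PySem.List.sorted_eq_foldl_insertBy, PySem.List.sorted_eq_foldl_insertBy, List.foldl_map]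
  suffices h : ∀ (acc : List α),
      xs.foldl (fun acc x => PySem.List.insertBy (fun a b => decide (key a < key b)) (g x) acc) (acc.map g)
        = (xs.foldl (fun acc x => PySem.List.insertBy (fun a b => decide (key (g a) < key (g b))) x acc) acc).map g by
    simpa using h []
  intro acc
  induction xs generalizing acc with
  | nil => rfl
  | cons x t ih => simp [pv_insertBy_map, ih]

theorem pv_insertBy_LL (x : Int × Char) (ys : List (Int × Char))
    (hys : ys.Pairwise pvLL) (hx : ∀ y ∈ ys, y.1 < x.1) :
    (PySem.List.insertBy (fun a b => decide ((fun p : Int × Char => p.2) a < (fun p : Int × Char => p.2) b)) x ys).Pairwise pvLL := by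
  induction ys with
  | nil => simp [PySem.List.insertBy, pvLL]
  | cons y t ih =>
      rcases List.pairwise_cons.mp hys with ⟨hyt, htp⟩
      by_cases h : x.2 < y.2
      · rw [show PySem.List.insertBy (fun a b => decide ((fun p : Int × Char => p.2) a < (fun p : Int × Char => p.2) b)) x (y :: t)
            = x :: y :: t by simp [PySem.List.insertBy, h]]
        refine List.pairwise_cons.mpr ⟨?_, hys⟩
        intro z hz
        rcases List.mem_cons.mp hz with rfl | hz
        · exact Or.inl h
        · have := hyt z hz
          rcases this with h2 | ⟨h2, _⟩
          · exact Or.inl (lt_trans h h2)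
          · exact Or.inl (h2 ▸ h)
      · rw [show PySem.List.insertBy (fun a b => decide ((fun p : Int × Char => p.2) a < (fun p : Int × Char => p.2) b)) x (y :: t)
            = y :: PySem.List.insertBy (fun a b => decide ((fun p : Int × Char => p.2) a < (fun p : Int × Char => p.2) b)) x t by
            simp [PySem.List.insertBy, h]]
        refine List.pairwise_cons.mpr ⟨?_, ih htp (fun z hz => hx z (List.mem_cons_of_mem _ hz))⟩
        intro z hz
        rcases (PySem.List.mem_insertBy _ x z t).mp hz with rfl | hz
        · rcases lt_or_eq_of_le (le_of_not_gt h) with h2 | h2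
          · exact Or.inl h2
          · exact Or.inr ⟨h2, hx y (List.mem_cons_self)⟩
        · exact hyt z hz

theorem pv_sorted_stable (E : List (Int × Char)) (hE : E.Pairwise (fun a b => a.1 < b.1)) :
    (PySem.List.sorted E (fun p => p.2)).Pairwise pvLL := by
  rw [PySem.List.sorted_eq_foldl_insertBy]
  suffices h : ∀ (E : List (Int × Char)) (acc : List (Int × Char)),
      E.Pairwise (fun a b => a.1 < b.1) → acc.Pairwise pvLL →
      (∀ a ∈ acc, ∀ b ∈ E, a.1 < b.1) →
      (E.foldl (fun acc x => PySem.List.insertBy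
        (fun a b => decide ((fun p : Int × Char => p.2) a < (fun p : Int × Char => p.2) b)) x acc) acc).Pairwise pvLL by
    exact h E [] hE (List.Pairwise.nil) (by simp)
  intro E
  induction E with
  | nil => intro acc _ hacc _; simpa using hacc
  | cons x t ih =>
      intro acc hE hacc hlt
      rcases List.pairwise_cons.mp hE with ⟨hxt, htp⟩
      simp only [List.foldl_cons]
      apply ih _ htp
      · exact pv_insertBy_LL x acc hacc (fun y hy => hlt y hy x List.mem_cons_self)
      · intro a ha b hb
        rcases (PySem.List.mem_insertBy _ x a acc).mp ha with rfl | ha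
        · exact hxt b hb
        · exact hlt a ha b (List.mem_cons_of_mem _ hb)

theorem pv_blocks_length (cs : List Char) (f : Int → Int) (is : List Int) (pos : Int) :
    (pvBlocks cs f is pos).length = is.length := by
  induction is generalizing pos with
  | nil => rfl
  | cons i t ih => simp [pvBlocks, ih]

theorem pv_slices_eq (cs : List Char) (f : Int → Int) (σ : List (Int × Char)) :
    pvA_slices cs (σ.map (fun p => (p.2, f p.1)))
      = pvBlocks cs f (σ.map (fun p => p.1)) 0 := by
  unfold pvA_slices
  rw [List.foldl_map]
  suffices h : ∀ (σ : List (Int × Char)) (acc : List (List Char)) (pos : Int),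
      (σ.foldl (fun (st : List (List Char) × Int × Int) p =>
        (st.1 ++ [PySem.Chars.slice cs (some st.2.1) (some (st.2.2 + f p.1))],
          (st.2.1 + f p.1, st.2.2 + f p.1))) (acc, pos, pos)).1
        = acc ++ pvBlocks cs f (σ.map (fun p => p.1)) pos by
    simpa using h σ [] 0
  intro σ acc pos
  induction σ generalizing acc pos with
  | nil => simp [pvBlocks]
  | cons p t ih =>
      simpa [pvBlocks, List.append_assoc] using
        ih (acc ++ [PySem.Chars.slice cs (some pos) (some (pos + f p.1))]) (pos + f p.1)

theorem pv_scanPick_spec (c : Char) (pre post : List ((Int × Char) × List Char))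
    (w : (Int × Char) × List Char)
    (hpre : ∀ v ∈ pre, c ≠ v.1.2) (hw : w.1.2 = c) :
    pvA_scanPick c ((pre ++ w :: post).map (fun w => (w.1.2, w.2)))
      = (some (w.1.2, w.2), (pre ++ post).map (fun w => (w.1.2, w.2))) := by
  induction pre with
  | nil => simp [pvA_scanPick, hw]
  | cons v p ih =>
      have hne : c ≠ v.1.2 := hpre v List.mem_cons_self
      have ih' := ih (fun u hu => hpre u (List.mem_cons_of_mem _ hu))
      simp only [List.cons_append, List.map_cons] at *
      rw [show pvA_scanPick c ((v.1.2, v.2) :: (p ++ w :: post).map (fun w => (w.1.2, w.2)))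
          = ((pvA_scanPick c ((p ++ w :: post).map (fun w => (w.1.2, w.2)))).1,
             (v.1.2, v.2) :: (pvA_scanPick c ((p ++ w :: post).map (fun w => (w.1.2, w.2)))).2) by
        simp [pvA_scanPick, hne]]
      rw [ih']

theorem pv_match_eq (ks : List Char) (s : Int) (Z : List ((Int × Char) × List Char)) :
    (Z.map (fun w => w.1)).Perm (PySem.List.enumerate ks s) →
    (Z.map (fun w => w.1)).Pairwise pvLL →
    pvA_match ks (Z.map (fun w => (w.1.2, w.2)))
      = (PySem.List.enumerate ks s).map (fun p => (p.2, pvPickD Z p.1)) := by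
  suffices h : ∀ (ks : List Char) (s : Int) (Z : List ((Int × Char) × List Char))
      (acc : List (Char × List Char)),
      (Z.map (fun w => w.1)).Perm (PySem.List.enumerate ks s) →
      (Z.map (fun w => w.1)).Pairwise pvLL →
      (ks.foldl (fun st i =>
        match pvA_scanPick i st.2 with
        | (some j, rest) => (st.1 ++ [j], rest)
        | (none, rest) => (st.1, rest))
        ((acc, Z.map (fun w => (w.1.2, w.2))) :
          List (Char × List Char) × List (Char × List Char))).1
        = acc ++ (PySem.List.enumerate ks s).map (fun p => (p.2, pvPickD Z p.1)) by
    intro hperm hLL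
    simpa [pvA_match] using h ks s Z [] hperm hLL
  intro ks
  induction ks with
  | nil =>
      intro s Z acc _ _
      simp [PySem.List.enumerate]
  | cons c t ih =>
      intro s Z acc hperm hLL
      have hen : PySem.List.enumerate (c :: t) s
          = (s, c) :: PySem.List.enumerate t (s + 1) := by
        simp [PySem.List.enumerate]
      have hmem : (s, c) ∈ Z.map (fun w => w.1) := by
        rw [hperm.mem_iff, hen]; exact List.mem_cons_self
      obtain ⟨w, hwZ, hw1⟩ := List.mem_map.mp hmem
      obtain ⟨pre, post, rfl⟩ := List.append_of_mem hwZ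
      have hw1s : w.1.1 = s := by rw [hw1]
      have hw2c : w.1.2 = c := by rw [hw1]
      have hmapZ : (pre ++ w :: post).map (fun w => w.1)
          = pre.map (fun w => w.1) ++ w.1 :: post.map (fun w => w.1) := by
        simp
      -- every index occurring in Z is ≥ s
      have hbound : ∀ v ∈ (pre ++ w :: post).map (fun w => w.1), s ≤ v.1 := by
        intro v hv
        exact (pv_fst_mem_enumerate (c :: t) s v (hperm.mem_iff.mp hv)).1
      -- the indices of Z are pairwise distinct
      have hnodup : ((pre ++ w :: post).map (fun w => w.1.1)).Nodup := by
        have h1 : ((pre ++ w :: post).map (fun w => w.1.1))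
            = (((pre ++ w :: post).map (fun w => w.1)).map (fun p => p.1)) := by
          rw [List.map_map]; rfl
        rw [h1]
        have h2 := hperm.map (fun p : Int × Char => p.1)
        rw [PySem.List.map_fst_enumerate] at h2
        exact h2.nodup_iff.mpr (pv_pyRange_nodup _ _)
      have hcross : ∀ v ∈ pre, pvLL v.1 w.1 := by
        intro v hv
        rw [hmapZ] at hLL
        exact (List.pairwise_append.mp hLL).2.2 v.1 (List.mem_map_of_mem hv)
          w.1 (by exact List.mem_cons_self)
      -- no pair before w carries the letter c
      have hpre_ne : ∀ v ∈ pre, c ≠ v.1.2 := by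
        intro v hv heq
        rcases hcross v hv with h2 | ⟨h2, h3⟩
        · rw [← heq, hw2c] at h2; exact lt_irrefl _ h2
        · have := hbound v.1 (by simp [List.mem_map_of_mem hv])
          omega
      -- no pair before w carries the index s either
      have hpre_idx : ∀ v ∈ pre, v.1.1 ≠ s := by
        intro v hv heq
        rw [List.map_append, List.map_cons] at hnodup
        have hdisj := (List.nodup_append.mp hnodup).2.2
        exact hdisj v.1.1 (List.mem_map_of_mem hv) w.1.1 List.mem_cons_self (by omega)
      -- the value the matching loop picks for the first query
      have hpick : pvPickD (pre ++ w :: post) s = w.2 := by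
        unfold pvPickD
        rw [List.find?_append]
        have h1 : pre.find? (fun w' => w'.1.1 == s) = none := by
          rw [List.find?_eq_none]
          intro v hv
          simpa using hpre_idx v hv
        rw [h1, Option.none_or, List.find?_cons_of_pos (by simpa using hw1s)]
        rfl
      -- later queries never look at index s, so dropping w changes nothing
      have hrest : ∀ p ∈ PySem.List.enumerate t (s + 1),
          pvPickD (pre ++ post) p.1 = pvPickD (pre ++ w :: post) p.1 := by
        intro p hp
        have hps : s + 1 ≤ p.1 := (pv_fst_mem_enumerate t (s + 1) p hp).1
        unfold pvPickD
        rw [List.find?_append, List.find?_append, List.find?_cons_of_neg (by simp; omega)]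
      rw [List.foldl_cons, pv_scanPick_spec c pre post w hpre_ne hw2c]
      have hperm' : ((pre ++ post).map (fun w => w.1)).Perm (PySem.List.enumerate t (s + 1)) := by
        have h2 : (pre.map (fun w => w.1) ++ w.1 :: post.map (fun w => w.1)).Perm
            (w.1 :: (pre.map (fun w => w.1) ++ post.map (fun w => w.1))) := List.perm_middle
        have h3 := (h2.symm.trans (hmapZ ▸ hperm))
        rw [hen, hw1] at h3
        have h4 := h3.cons_inv
        simpa using h4
      have hLL' : ((pre ++ post).map (fun w => w.1)).Pairwise pvLL := by
        have hsub : ((pre ++ post).map (fun w => w.1)).Sublist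
            ((pre ++ w :: post).map (fun w => w.1)) := by
          exact (List.append_sublist_append_left pre).mpr (List.sublist_cons_self w post) |>.map _
        exact hLL.sublist hsub
      rw [ih (s + 1) (pre ++ post) (acc ++ [(w.1.2, w.2)]) hperm' hLL']
      rw [hen, List.map_cons, hw2c, hpick]
      rw [List.map_congr_left (fun p hp => by rw [hrest p hp])]
      simp

def pvSetFold (Z : List ((Int × Char) × List Char)) (arr : List (List Char)) : List (List Char) :=
  Z.foldl (fun arr w => arr.set w.1.1.toNat w.2) arr

theorem pv_fill_as_setFold (cs : List Char) (f : Int → Int) (σ : List (Int × Char))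
    (arr : List (List Char)) (pos : Int) :
    ((σ.map (fun p => p.1)).foldl (fun (st : List (List Char) × Int) i =>
        (st.1.set i.toNat (PySem.Chars.slice cs (some st.2) (some (st.2 + f i))), st.2 + f i))
      (arr, pos)).1
      = pvSetFold (σ.zip (pvBlocks cs f (σ.map (fun p => p.1)) pos)) arr := by
  induction σ generalizing arr pos with
  | nil => simp [pvSetFold, pvBlocks]
  | cons p t ih =>
      simp only [List.map_cons, List.foldl_cons, pvBlocks, List.zip_cons_cons]
      rw [ih]
      rfl

theorem pv_setFold_getElem? (Z : List ((Int × Char) × List Char)) (arr : List (List Char))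
    (hnd : (Z.map (fun w => w.1.1)).Nodup)
    (hb : ∀ w ∈ Z, 0 ≤ w.1.1 ∧ w.1.1 < (arr.length : Int)) (j : Nat) :
    (pvSetFold Z arr)[j]?
      = if (j : Int) ∈ Z.map (fun w => w.1.1) then some (pvPickD Z (j : Int)) else arr[j]? := by
  induction Z generalizing arr with
  | nil => simp [pvSetFold]
  | cons w t ih =>
      obtain ⟨hw0, hwlt⟩ := hb w List.mem_cons_self
      rw [List.map_cons] at hnd
      obtain ⟨hhead, htail⟩ := List.nodup_cons.mp hnd
      have harr' : (arr.set w.1.1.toNat w.2).length = arr.length := by simp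
      have hstep : pvSetFold (w :: t) arr = pvSetFold t (arr.set w.1.1.toNat w.2) := rfl
      rw [hstep, ih (arr.set w.1.1.toNat w.2) htail
        (fun v hv => by
          obtain ⟨h1, h2⟩ := hb v (List.mem_cons_of_mem _ hv)
          exact ⟨h1, by rw [harr']; exact h2⟩)]
      by_cases hj : (j : Int) = w.1.1
      · have hjt : (j : Int) ∉ t.map (fun w => w.1.1) := by
          rw [hj]; exact hhead
        rw [if_neg hjt, if_pos (by simp [hj])]
        rw [List.getElem?_set]
        have hjn : w.1.1.toNat = j := by omega
        rw [if_pos hjn, if_pos (by omega)]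
        unfold pvPickD
        rw [List.find?_cons_of_pos (by simpa using hj.symm)]
        rfl
      · have hne : w.1.1.toNat ≠ j := by omega
        rw [List.getElem?_set, if_neg hne]
        have hmem : ((j : Int) ∈ (w :: t).map (fun w => w.1.1))
            ↔ ((j : Int) ∈ t.map (fun w => w.1.1)) := by
          simp only [List.map_cons, List.mem_cons]
          constructor
          · rintro (h | h)
            · exact absurd h hj
            · exact h
          · exact Or.inr
        have hpick : pvPickD (w :: t) (j : Int) = pvPickD t (j : Int) := by
          unfold pvPickD
          rw [List.find?_cons_of_neg (by simpa using fun h => hj h.symm)]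
        rw [hpick] at *
        by_cases hmt : (j : Int) ∈ t.map (fun w => w.1.1)
        · rw [if_pos hmt, if_pos (hmem.mpr hmt)]
        · rw [if_neg hmt, if_neg (fun h => hmt (hmem.mp h))]

theorem pv_fill_eq (cs : List Char) (q r : Int) (n : Nat) (σ : List (Int × Char))
    (hperm : (σ.map (fun p => p.1)).Perm (PySem.List.pyRange 0 (n : Int) 1)) :
    pvB_fill cs q r n (σ.map (fun p => p.1))
      = (List.range n).map (fun k =>
          pvPickD (σ.zip (pvBlocks cs (fun i => if i < r then q + 1 else q) (σ.map (fun p => p.1)) 0)) (Int.ofNat k)) := by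
  have hlenb : (pvBlocks cs (fun i => if i < r then q + 1 else q) (σ.map (fun p => p.1)) 0).length
      = σ.length := by rw [pv_blocks_length]; simp
  set f : Int → Int := fun i => if i < r then q + 1 else q with hf
  set bs := pvBlocks cs f (σ.map (fun p => p.1)) 0 with hbs
  set Z := σ.zip bs with hZdef
  have hZfst : Z.map (fun w => w.1) = σ := by
    rw [hZdef]
    exact List.map_fst_zip (by omega)
  have hZidx : Z.map (fun w => w.1.1) = σ.map (fun p => p.1) := by
    have : Z.map (fun w => w.1.1) = (Z.map (fun w => w.1)).map (fun p => p.1) := by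
      rw [List.map_map]; rfl
    rw [this, hZfst]
  have hnd : (Z.map (fun w => w.1.1)).Nodup := by
    rw [hZidx]
    exact hperm.nodup_iff.mpr (pv_pyRange_nodup _ _)
  have hb : ∀ w ∈ Z, 0 ≤ w.1.1 ∧ w.1.1 < ((List.replicate n ([] : List Char)).length : Int) := by
    intro w hw
    have h1 : w.1.1 ∈ Z.map (fun w => w.1.1) := List.mem_map_of_mem hw
    rw [hZidx] at h1
    have h2 := PySem.List.mem_pyRange_one.mp (hperm.mem_iff.mp h1)
    simpa using h2
  have hfill : pvB_fill cs q r n (σ.map (fun p => p.1)) = pvSetFold Z (List.replicate n []) := by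
    unfold pvB_fill
    rw [pv_fill_as_setFold cs f σ (List.replicate n []) 0]
  rw [hfill]
  apply List.ext_getElem?
  intro j
  rw [pv_setFold_getElem? Z (List.replicate n []) hnd hb j]
  by_cases hjn : j < n
  · have hmem : (j : Int) ∈ Z.map (fun w => w.1.1) := by
      rw [hZidx, hperm.mem_iff, PySem.List.mem_pyRange_one]
      omega
    rw [if_pos hmem, List.getElem?_map, List.getElem?_range hjn]
    rfl
  · have hmem : (j : Int) ∉ Z.map (fun w => w.1.1) := by
      rw [hZidx, hperm.mem_iff, PySem.List.mem_pyRange_one]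
      omega
    rw [if_neg hmem]
    rw [List.getElem?_eq_none (by simpa using Nat.le_of_not_lt hjn),
      List.getElem?_eq_none (by simpa using Nat.le_of_not_lt hjn)]

theorem pv_read_eq (q : Int) (ordered : List (Char × List Char)) :
    pvA_read q ordered = pvB_read q (ordered.map (fun j => j.2)) := by
  unfold pvA_read pvB_read
  simp only [List.foldl_map]

-- ===== VERDICT (by name: the statement is the Claim_ definition above) =====
theorem untransposeTextByColumn_spec : Claim_equal_untransposeTextByColumn := by
  intro key cipher _ hpre
  unfold Spec_untransposeTextByColumn
  simp only [untransposeTextByColumn, untransposeTextByColumn_alt]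
  set ks := key.toList with hksdef
  set cs := cipher.toList with hcsdef
  have hkne : ks ≠ [] := fun h => hpre (String.toList_eq_nil_iff.mp h)
  set n := ks.length with hndef
  have hn : 0 < n := List.length_pos_iff.mpr hkne
  have hlenk : PySem.List.len ks = (n : Int) := rfl
  have hnpos : (0 : Int) < PySem.List.len ks := by rw [hlenk]; exact_mod_cast hn
  set q := PySem.Int.floordiv (PySem.List.len cs) (PySem.List.len ks) with hqdef
  set r := PySem.Int.mod (PySem.List.len cs) (PySem.List.len ks) with hrdef
  have hr0 : 0 ≤ r := PySem.Int.mod_nonneg _ hnpos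
  have hrn : r < (n : Int) := by
    have := PySem.Int.mod_lt (PySem.List.len cs) hnpos
    rw [hlenk] at this
    exact this
  set f : Int → Int := fun i => if i < r then q + 1 else q with hfdef
  set E := PySem.List.enumerate ks with hEdef
  set σ := PySem.List.sorted E (fun p : Int × Char => p.2) with hσdef
  have hpermE : σ.Perm E := PySem.List.sorted_perm E _ false
  have hLLσ : σ.Pairwise pvLL := pv_sorted_stable E (pv_enumerate_pairwise ks 0)
  -- the block sizes list of A in closed form
  have hnums : pvA_buildNums (PySem.List.len ks) r q
      = (PySem.List.pyRange 0 (PySem.List.len ks) 1).map f := by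
    have h1 : ((r.toNat : Nat) : Int) = r := by omega
    have h2 := pv_buildNums_eq (PySem.List.len ks) q r.toNat (by rw [hlenk]; omega)
    rw [h1] at h2
    exact h2
  -- A's sorted (letter, size) pairs come from the sorted enumeration
  have hkn : PySem.List.sorted (ks.zip (pvA_buildNums (PySem.List.len ks) r q))
        (fun x : Char × Int => x.1)
      = σ.map (fun p => (p.2, f p.1)) := by
    rw [hnums, pv_zip_eq ks f,
      pv_sorted_map (fun p : Int × Char => (p.2, f p.1)) (fun x : Char × Int => x.1) E]
  -- A's sorted key letters are the letters of the sorted enumeration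
  have hko : PySem.List.sorted ks (fun c : Char => c) = σ.map (fun p => p.2) := by
    conv_lhs => rw [← PySem.List.map_snd_enumerate ks 0]
    rw [pv_sorted_map (fun p : Int × Char => p.2) (fun c : Char => c) (PySem.List.enumerate ks 0)]
  set bs := pvBlocks cs f (σ.map (fun p => p.1)) 0 with hbsdef
  set Z := σ.zip bs with hZdef
  have hlenbs : bs.length = σ.length := by rw [hbsdef, pv_blocks_length]; simp
  have hZfst : Z.map (fun w => w.1) = σ := by
    rw [hZdef]; exact List.map_fst_zip (by omega)
  -- A's arranged list of (letter, block) pairs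
  have harr : (σ.map (fun p => p.2)).zip bs = Z.map (fun w => (w.1.2, w.2)) := by
    rw [hZdef, List.zip_map_left]
    apply List.map_congr_left
    intro w _
    cases w with
    | mk a b => rfl
  -- A's reordering loop produces, for each key position, the block of that original column
  have hperm0 : (Z.map (fun w => w.1)).Perm (PySem.List.enumerate ks 0) := by
    rw [hZfst]; exact hpermE
  have hLL0 : (Z.map (fun w => w.1)).Pairwise pvLL := by rw [hZfst]; exact hLLσ
  have hmatch := pv_match_eq ks 0 Z hperm0 hLL0
  -- B's columns are exactly those blocks, indexed by original column
  have hpermP : (σ.map (fun p => p.1)).Perm (PySem.List.pyRange 0 (n : Int) 1) := by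
    have h1 := hpermE.map (fun p : Int × Char => p.1)
    rw [PySem.List.map_fst_enumerate ks 0] at h1
    simpa using h1
  have hfill := pv_fill_eq cs q r n σ hpermP
  -- assemble
  rw [hkn, pv_slices_eq cs f σ, hko, harr, hmatch, hfill, pv_read_eq]
  congr 1
  rw [List.map_map]
  have hEexp : PySem.List.enumerate ks 0
      = (PySem.List.pyRange 0 (PySem.List.len ks) 1).map (fun j => (j, PySem.List.pyGetD ks j ' ')) :=
    PySem.List.enumerate_eq_map_pyRange ks ' '
  rw [hEexp, List.map_map, hlenk, PySem.List.pyRange_zero_nat, List.map_map]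
  congr 1
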